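-- pv_equiv track=rewrite | github.com/aaron031291/grace-3.1- | backend/cognitive/advanced_memory_cognition.py | _structure_context_for_attention
-- ===== SOURCE A (Python) =====
-- def _structure_context_for_attention(context: str) -> str:
--     """Structure context to maximize attention effectiveness."""
--     # Split into sections
--     sections = context.split("\n\n")
--
--     # Prioritize sections (put most important first)
--     # Simple heuristic: longer sections with more detail
--     sections_with_priority = [
--         (len(s.split()), s) for s in sections
--     ]
--     sections_with_priority.sort(reverse=True)  # Longest first
--
--     # Rebuild with priority markers
--     structured = "=== MOST IMPORTANT ===\n"
--     structured += sections_with_priority[0][1] + "\n\n"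
--
--     if len(sections_with_priority) > 1:
--         structured += "=== IMPORTANT ===\n"
--         for _, section in sections_with_priority[1:3]:
--             structured += section + "\n\n"
--
--     if len(sections_with_priority) > 3:
--         structured += "=== ADDITIONAL CONTEXT ===\n"
--         for _, section in sections_with_priority[3:]:
--             structured += section + "\n\n"
--
--     return structured.strip()
-- ===== SOURCE B (Python) =====
-- def _structure_context_for_attention(context: str) -> str:
--     """Structure context to maximize attention effectiveness."""
--     # Selection-based: no sort call, no slices. Repeatedly extract the currently
--     # most important section (max word count, ties by text) to build the priority
--     # order, then emit it in one loop with headers driven by a rank->header dict.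
--     remaining = [(len(s.split()), s) for s in context.split("\n\n")]
--     ordered = []
--     while remaining:
--         best = max(remaining)
--         remaining.remove(best)
--         ordered.append(best)
--
--     headers = {
--         0: "=== MOST IMPORTANT ===\n",
--         1: "=== IMPORTANT ===\n",
--         3: "=== ADDITIONAL CONTEXT ===\n",
--     }
--     out = ""
--     for rank, (_, section) in enumerate(ordered):
--         out += headers.get(rank, "") + section + "\n\n"
--     return out.strip()
-- ===== Notes on version B (the rewrite author's own statement) =====
-- stated objective: alternative
-- what changed: Replaces A's library sort plus three separately-sliced header blocks with selection-based extraction (repeatedly take max(remaining) and remove it) and a single emission loop whose headers come from a rank->header dict lookup.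
import Mathlib
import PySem

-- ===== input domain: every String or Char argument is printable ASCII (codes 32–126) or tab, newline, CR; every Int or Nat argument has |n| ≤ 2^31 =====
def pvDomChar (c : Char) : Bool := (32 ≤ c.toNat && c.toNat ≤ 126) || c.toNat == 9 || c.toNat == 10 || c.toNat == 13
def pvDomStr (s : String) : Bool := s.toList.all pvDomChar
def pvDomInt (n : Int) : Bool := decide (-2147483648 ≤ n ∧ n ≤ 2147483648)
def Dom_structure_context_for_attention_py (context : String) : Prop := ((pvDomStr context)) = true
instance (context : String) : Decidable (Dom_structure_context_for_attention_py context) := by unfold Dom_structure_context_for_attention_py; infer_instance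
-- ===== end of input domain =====

-- B replaces A's library sort and three sliced header blocks by selection-based extraction
-- (repeatedly take the max pair and remove it) plus one emission loop with a rank→header dict.

-- ===== PORT A =====
-- A: split on "\n\n", pair each section with its word count, sort the pairs descending
-- (Python tuple order: count first, then the string), then three sliced blocks with headers.
def structure_context_for_attention_py (context : String) : String :=
  let sections : List String :=
    List.map String.ofList (PySem.Chars.splitOn context.toList ("\n\n".toList))
  let swp : List (Nat × String) :=
    sections.map (fun s => ((PySem.Str.split₀ s).length, s))
  let swp := PySem.List.sorted2 swp (fun p => p.1) (fun p => p.2) true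
  let structured := "=== MOST IMPORTANT ===\n"
  -- swp is provably nonempty (split always returns ≥ 1 piece); headD is only a totality guard
  let structured := structured ++ (swp.headD (0, "")).2 ++ "\n\n"
  let structured := if 1 < swp.length then
      (PySem.List.slice swp (some 1) (some 3)).foldl
        (fun acc p => acc ++ p.2 ++ "\n\n") (structured ++ "=== IMPORTANT ===\n")
    else structured
  let structured := if 3 < swp.length then
      (PySem.List.slice swp (some 3) none).foldl
        (fun acc p => acc ++ p.2 ++ "\n\n") (structured ++ "=== ADDITIONAL CONTEXT ===\n")
    else structured
  PySem.Str.strip structured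

-- ===== PORT B =====
-- B: while remaining: best = max(remaining); remaining.remove(best); ordered.append(best).
-- Then one loop over enumerate(ordered) emitting headers via a rank→header dict.

-- termination lemma for the while loop (cited by selExtract's decreasing_by)
lemma remove?_length_lt (l r : List (Nat × String)) (v : Nat × String)
    (h : PySem.List.remove? l v = some r) : r.length < l.length := by
  have hv : v ∈ l := by
    by_contra hv
    rw [(PySem.List.remove?_eq_none_iff l v).mpr hv] at h
    simp at h
  rw [PySem.List.remove?_eq_some_erase l v hv] at h
  cases h
  have := List.length_erase_of_mem hv
  have : 0 < l.length := List.length_pos_of_mem hv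
  omega

-- the while loop of B: repeatedly extract max(remaining) (first maximal pair) and remove it
def selExtract (l : List (Nat × String)) : List (Nat × String) :=
  match hm : PySem.List.max2? l (fun p => p.1) (fun p => p.2) with
  | none => []
  | some m =>
    match hr : PySem.List.remove? l m with
    | none => []      -- unreachable: the max is a member
    | some rest => m :: selExtract rest
termination_by l.length
decreasing_by exact remove?_length_lt l rest m hr

def structure_context_for_attention_py_alt (context : String) : String :=
  let remaining : List (Nat × String) :=
    (List.map String.ofList (PySem.Chars.splitOn context.toList ("\n\n".toList))).map
      (fun s => ((PySem.Str.split₀ s).length, s))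
  let ordered := selExtract remaining
  let headers : PySem.Dict Int String := PySem.Dict.ofList
    [(0, "=== MOST IMPORTANT ===\n"), (1, "=== IMPORTANT ===\n"),
     (3, "=== ADDITIONAL CONTEXT ===\n")]
  let out := (PySem.List.enumerate ordered).foldl
    (fun acc rp => acc ++ PySem.Dict.getD headers rp.1 "" ++ rp.2.2 ++ "\n\n") ""
  PySem.Str.strip out

-- ===== PRECONDITION & SPEC =====
def Spec_structure_context_for_attention_py (context : String) (out : String) : Prop := out = structure_context_for_attention_py_alt context
instance (context : String) (out : String) : Decidable (Spec_structure_context_for_attention_py context out) := by unfold Spec_structure_context_for_attention_py; infer_instance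

-- ===== CLAIM (what is proved, stated in full; the proofs are below) =====
def Claim_equal_structure_context_for_attention_py : Prop := ∀ (context : String), Dom_structure_context_for_attention_py context → Spec_structure_context_for_attention_py context (structure_context_for_attention_py context)

-- ===== LEMMAS AND PROOFS =====

-- Python's tuple '<' on (word count, section): the comparison both max2? and sorted2 use
def pyLt (a b : Nat × String) : Bool :=
  decide (a.1 < b.1) || (!decide (b.1 < a.1) && decide (a.2 < b.2))

lemma pyLt_iff (a b : Nat × String) :
    pyLt a b = true ↔ a.1 < b.1 ∨ (¬ b.1 < a.1 ∧ a.2 < b.2) := by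
  simp [pyLt]

lemma pyLt_irrefl (a : Nat × String) : pyLt a a = false := by
  simp [pyLt]

lemma pyLt_trans {a b c : Nat × String} (h1 : pyLt a b = true) (h2 : pyLt b c = true) :
    pyLt a c = true := by
  rw [pyLt_iff] at *
  rcases h1 with h1 | ⟨h1, h1'⟩ <;> rcases h2 with h2 | ⟨h2, h2'⟩
  · exact Or.inl (lt_trans h1 h2)
  · exact Or.inl (lt_of_lt_of_le h1 (not_lt.mp h2))
  · exact Or.inl (lt_of_le_of_lt (not_lt.mp h1) h2)
  · exact Or.inr ⟨by omega, lt_trans h1' h2'⟩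

lemma pyLt_asymm {a b : Nat × String} (h : pyLt a b = true) : pyLt b a = false := by
  by_contra hb
  rw [Bool.not_eq_false] at hb
  have h2 := pyLt_trans h hb
  rw [pyLt_irrefl] at h2
  exact Bool.noConfusion h2

lemma pyLt_antisymm {a b : Nat × String} (h1 : pyLt a b = false) (h2 : pyLt b a = false) :
    a = b := by
  rw [← Bool.not_eq_true, pyLt_iff] at h1 h2
  push_neg at h1 h2
  obtain ⟨h1a, h1b⟩ := h1
  obtain ⟨h2a, h2b⟩ := h2
  have hn : a.1 = b.1 := by omega
  have hs : a.2 = b.2 := le_antisymm (h2b (by omega)) (h1b (by omega))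
  exact Prod.ext hn hs

lemma notLt_trans {a b c : Nat × String} (h1 : pyLt a b = false) (h2 : pyLt b c = false) :
    pyLt a c = false := by
  by_contra h
  rw [Bool.not_eq_false, pyLt_iff] at h
  rw [← Bool.not_eq_true, pyLt_iff] at h1 h2
  push_neg at h1 h2
  obtain ⟨h1a, h1b⟩ := h1
  obtain ⟨h2a, h2b⟩ := h2
  rcases h with h | ⟨ha, hs⟩
  · omega
  · have hba : b.2 ≤ a.2 := h1b (by omega)
    have hcb : c.2 ≤ b.2 := h2b (by omega)
    exact absurd hs (not_lt.mpr (le_trans hcb hba))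

-- B's max(remaining) step, named so the fold over it can be reasoned about
def maxStep (acc : Option (Nat × String)) (x : Nat × String) : Option (Nat × String) :=
  match acc with
  | none => some x
  | some m => if pyLt m x then some x else some m

lemma max2?_eq_foldl (l : List (Nat × String)) :
    PySem.List.max2? l (fun p => p.1) (fun p => p.2) = l.foldl maxStep none := by
  simp only [PySem.List.max2?]
  congr 1
  funext acc x
  cases acc <;> rfl

lemma maxFold_spec :
    ∀ (t : List (Nat × String)) (a m : Nat × String),
      t.foldl maxStep (some a) = some m →
      (m = a ∨ m ∈ t) ∧ pyLt m a = false ∧ ∀ y ∈ t, pyLt m y = false := by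
  intro t
  induction t with
  | nil =>
    intro a m h
    injection h with h
    subst h
    exact ⟨Or.inl rfl, pyLt_irrefl a, by simp⟩
  | cons x t ih =>
    intro a m h
    simp only [List.foldl_cons, maxStep] at h
    by_cases hax : pyLt a x = true
    · rw [if_pos hax] at h
      obtain ⟨hmem, hmx, hall⟩ := ih x m h
      have hma : pyLt m a = false := by
        by_contra hc
        rw [Bool.not_eq_false] at hc
        have h3 := pyLt_trans hc hax
        rw [hmx] at h3
        exact Bool.noConfusion h3
      refine ⟨Or.inr (by rcases hmem with hm' | hm' <;> simp [hm']), hma, ?_⟩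
      intro y hy
      rcases List.mem_cons.mp hy with hy | hy
      · exact hy ▸ hmx
      · exact hall y hy
    · rw [if_neg hax] at h
      obtain ⟨hmem, hma, hall⟩ := ih a m h
      have hax' : pyLt a x = false := Bool.eq_false_iff.mpr hax
      have hmx : pyLt m x = false := notLt_trans hma hax'
      refine ⟨(by rcases hmem with hm' | hm' <;> simp [hm']), hma, ?_⟩
      intro y hy
      rcases List.mem_cons.mp hy with hy | hy
      · exact hy ▸ hmx
      · exact hall y hy

lemma maxFold_ne_none :
    ∀ (t : List (Nat × String)) (a : Nat × String), t.foldl maxStep (some a) ≠ none := by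
  intro t
  induction t with
  | nil => intro a h; simp at h
  | cons x t ih =>
    intro a h
    simp only [List.foldl_cons, maxStep] at h
    by_cases hax : pyLt a x = true
    · rw [if_pos hax] at h; exact ih x h
    · rw [if_neg hax] at h; exact ih a h

lemma max2?_spec (l : List (Nat × String)) (m : Nat × String)
    (h : PySem.List.max2? l (fun p => p.1) (fun p => p.2) = some m) :
    m ∈ l ∧ ∀ y ∈ l, pyLt m y = false := by
  rw [max2?_eq_foldl] at h
  cases l with
  | nil => exact absurd h (by simp)
  | cons a t =>
    simp only [List.foldl_cons, maxStep] at h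
    obtain ⟨hmem, hma, hall⟩ := maxFold_spec t a m h
    refine ⟨by rcases hmem with hm' | hm' <;> simp [hm'], ?_⟩
    intro y hy
    rcases List.mem_cons.mp hy with hy | hy
    · exact hy ▸ hma
    · exact hall y hy

lemma max2?_cons_ne_none (a : Nat × String) (t : List (Nat × String)) :
    PySem.List.max2? (a :: t) (fun p => p.1) (fun p => p.2) ≠ none := by
  rw [max2?_eq_foldl]
  simp only [List.foldl_cons, maxStep]
  exact maxFold_ne_none t a

-- unfolding equations for selExtract
lemma selExtract_nil : selExtract [] = [] := by
  rw [selExtract]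
  rfl

lemma selExtract_cons (l : List (Nat × String)) (m : Nat × String)
    (rest : List (Nat × String))
    (hm : PySem.List.max2? l (fun p => p.1) (fun p => p.2) = some m)
    (hr : PySem.List.remove? l m = some rest) :
    selExtract l = m :: selExtract rest := by
  rw [selExtract]
  split
  · rename_i h
    rw [h] at hm
    simp at hm
  · rename_i m' h
    rw [h] at hm
    injection hm with hm
    subst hm
    split
    · rename_i h'
      rw [h'] at hr
      simp at hr
    · rename_i rest' h'
      rw [h'] at hr
      injection hr with hr
      rw [hr]

lemma selExtract_perm (l : List (Nat × String)) : (selExtract l).Perm l := by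
  induction l using selExtract.induct with
  | case1 l hm =>
    cases l with
    | nil => rw [selExtract_nil]
    | cons a t => exact absurd hm (max2?_cons_ne_none a t)
  | case2 l m hm hr =>
    have hmem := (max2?_spec l m hm).1
    exact absurd ((PySem.List.remove?_eq_none_iff l m).mp hr) (not_not_intro hmem)
  | case3 l m hm rest hr ih =>
    have hmem := (max2?_spec l m hm).1
    have hrest : rest = l.erase m := by
      have h2 := PySem.List.remove?_eq_some_erase l m hmem
      rw [h2] at hr
      injection hr with hr
      exact hr.symm
    rw [selExtract_cons l m rest hm hr]
    exact (ih.cons m).trans (hrest ▸ (List.perm_cons_erase hmem).symm)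

lemma selExtract_pairwise (l : List (Nat × String)) :
    (selExtract l).Pairwise (fun a b => pyLt a b = false) := by
  induction l using selExtract.induct with
  | case1 l hm =>
    cases l with
    | nil => rw [selExtract_nil]; exact List.Pairwise.nil
    | cons a t => exact absurd hm (max2?_cons_ne_none a t)
  | case2 l m hm hr =>
    have hmem := (max2?_spec l m hm).1
    exact absurd ((PySem.List.remove?_eq_none_iff l m).mp hr) (not_not_intro hmem)
  | case3 l m hm rest hr ih =>
    rw [selExtract_cons l m rest hm hr]
    refine List.Pairwise.cons ?_ ih
    intro y hy
    have hmem := (max2?_spec l m hm).1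
    have hrest : rest = l.erase m := by
      have h2 := PySem.List.remove?_eq_some_erase l m hmem
      rw [h2] at hr
      injection hr with hr
      exact hr.symm
    have hyl : y ∈ l := by
      have hy' : y ∈ rest := (selExtract_perm rest).mem_iff.mp hy
      exact List.mem_of_mem_erase (hrest ▸ hy')
    exact (max2?_spec l m hm).2 y hyl

lemma insertBy_pairwise (x : Nat × String) (l : List (Nat × String))
    (h : l.Pairwise (fun a b => pyLt a b = false)) :
    (PySem.List.insertBy (fun a b => pyLt b a) x l).Pairwise (fun a b => pyLt a b = false) := by
  induction l with
  | nil => simp [PySem.List.insertBy]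
  | cons y ys ih =>
    rw [PySem.List.insertBy]
    by_cases hxy : pyLt y x = true
    · rw [if_pos hxy]
      refine List.Pairwise.cons ?_ h
      intro z hz
      rcases List.mem_cons.mp hz with hz | hz
      · exact hz ▸ pyLt_asymm hxy
      · -- z ∈ ys; pyLt y z = false from h, so pyLt x z = false
        have hyz : pyLt y z = false := List.rel_of_pairwise_cons h hz
        by_contra hc
        rw [Bool.not_eq_false] at hc
        have h3 := pyLt_trans hxy hc
        rw [hyz] at h3
        exact Bool.noConfusion h3
    · rw [if_neg hxy]
      refine List.Pairwise.cons ?_ (ih (h.tail))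
      intro z hz
      rcases (PySem.List.mem_insertBy _ _ _ _).mp hz with hz | hz
      · exact hz ▸ Bool.eq_false_iff.mpr hxy
      · exact List.rel_of_pairwise_cons h hz

lemma foldl_insertBy_pairwise (l : List (Nat × String)) :
    ∀ acc : List (Nat × String), acc.Pairwise (fun a b => pyLt a b = false) →
      (l.foldl (fun acc x => PySem.List.insertBy (fun a b => pyLt b a) x acc) acc).Pairwise
        (fun a b => pyLt a b = false) := by
  induction l with
  | nil => intro acc h; exact h
  | cons x t ih =>
    intro acc h
    simp only [List.foldl_cons]
    exact ih _ (insertBy_pairwise x acc h)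

lemma sorted2_pairwise (l : List (Nat × String)) :
    (PySem.List.sorted2 l (fun p => p.1) (fun p => p.2) true).Pairwise
      (fun a b => pyLt a b = false) := by
  have hdef : PySem.List.sorted2 l (fun p => p.1) (fun p => p.2) true
      = l.foldl (fun acc x => PySem.List.insertBy (fun a b => pyLt b a) x acc) [] := rfl
  rw [hdef]
  exact foldl_insertBy_pairwise l [] (List.Pairwise.nil)

lemma selExtract_eq_sorted2 (l : List (Nat × String)) :
    selExtract l = PySem.List.sorted2 l (fun p => p.1) (fun p => p.2) true := by
  exact List.eq_of_perm_of_sorted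
    (fun a b _ _ h1 h2 => pyLt_antisymm h1 h2)
    (selExtract_pairwise l) (sorted2_pairwise l)
    ((selExtract_perm l).trans (PySem.List.sorted2_perm l _ _ true).symm)


-- splitOn never returns the empty list (so A's sections[0] and B's while loop see ≥ 1 piece)
lemma splitOn_go_ne_nil (sep : List Char) (fuel : Nat) (l cur : List Char) (acc : List (List Char)) :
    PySem.Chars.splitOn.go sep fuel l cur acc ≠ [] := by
  induction fuel generalizing l cur acc with
  | zero => simp [PySem.Chars.splitOn.go]
  | succ n ih =>
    cases l with
    | nil => simp [PySem.Chars.splitOn.go]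
    | cons c rest =>
      rw [PySem.Chars.splitOn.go]
      split
      · exact ih _ _ _
      · exact ih _ _ _

lemma splitOn_ne_nil (cs sep : List Char) : PySem.Chars.splitOn cs sep ≠ [] :=
  splitOn_go_ne_nil sep _ cs [] []

-- the rank→header dict of B, looked up at the concrete ranks
lemma getD_hdr0 : PySem.Dict.getD (PySem.Dict.ofList
    [((0 : Int), "=== MOST IMPORTANT ===\n"), (1, "=== IMPORTANT ===\n"),
     (3, "=== ADDITIONAL CONTEXT ===\n")]) 0 "" = "=== MOST IMPORTANT ===\n" := rfl
lemma getD_hdr1 : PySem.Dict.getD (PySem.Dict.ofList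
    [((0 : Int), "=== MOST IMPORTANT ===\n"), (1, "=== IMPORTANT ===\n"),
     (3, "=== ADDITIONAL CONTEXT ===\n")]) 1 "" = "=== IMPORTANT ===\n" := rfl
lemma getD_hdr2 : PySem.Dict.getD (PySem.Dict.ofList
    [((0 : Int), "=== MOST IMPORTANT ===\n"), (1, "=== IMPORTANT ===\n"),
     (3, "=== ADDITIONAL CONTEXT ===\n")]) 2 "" = "" := rfl
lemma getD_hdr3 : PySem.Dict.getD (PySem.Dict.ofList
    [((0 : Int), "=== MOST IMPORTANT ===\n"), (1, "=== IMPORTANT ===\n"),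
     (3, "=== ADDITIONAL CONTEXT ===\n")]) 3 "" = "=== ADDITIONAL CONTEXT ===\n" := rfl

lemma getD_hdr_high (n : Int) (h : 4 ≤ n) : PySem.Dict.getD (PySem.Dict.ofList
    [((0 : Int), "=== MOST IMPORTANT ===\n"), (1, "=== IMPORTANT ===\n"),
     (3, "=== ADDITIONAL CONTEXT ===\n")]) n "" = "" := by
  have he : (PySem.Dict.ofList
    [((0 : Int), "=== MOST IMPORTANT ===\n"), (1, "=== IMPORTANT ===\n"),
     (3, "=== ADDITIONAL CONTEXT ===\n")]) = PySem.Dict.mk [((0 : Int), "=== MOST IMPORTANT ===\n"), (1, "=== IMPORTANT ===\n"),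
     (3, "=== ADDITIONAL CONTEXT ===\n")] := rfl
  have h0 : ((0 : Int) == n) = false := by simp; omega
  have h1 : ((1 : Int) == n) = false := by simp; omega
  have h3 : ((3 : Int) == n) = false := by simp; omega
  rw [he]
  simp [PySem.Dict.getD, PySem.Dict.get?, List.find?, h0, h1, h3]

-- from rank 4 on, B's loop emits no header: it is A's plain section fold
lemma foldB_high (r : List (Nat × String)) :
    ∀ (n : Int), 4 ≤ n → ∀ acc : String,
      (PySem.List.enumerate r n).foldl
        (fun acc rp => acc ++ PySem.Dict.getD (PySem.Dict.ofList
    [((0 : Int), "=== MOST IMPORTANT ===\n"), (1, "=== IMPORTANT ===\n"),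
     (3, "=== ADDITIONAL CONTEXT ===\n")]) rp.1 "" ++ rp.2.2 ++ "\n\n") acc
      = r.foldl (fun acc p => acc ++ p.2 ++ "\n\n") acc := by
  induction r with
  | nil => intro n h acc; rfl
  | cons x r ih =>
    intro n h acc
    rw [PySem.List.enumerate_cons, List.foldl_cons, List.foldl_cons,
      getD_hdr_high n h, ih (n + 1) (by omega)]
    simp

-- slices at A's concrete bounds
lemma slice13_eq (x : Nat × String) (l : List (Nat × String)) :
    PySem.List.slice (x :: l) (some 1) (some 3) = l.take 2 := by
  rw [show (1:Int) = ((1:Nat):Int) by norm_num, show (3:Int) = ((3:Nat):Int) by norm_num,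
    PySem.List.slice_natCast]
  simp

lemma slice3_eq (l : List (Nat × String)) :
    PySem.List.slice l (some 3) none = l.drop 3 := by
  rw [show (3:Int) = ((3:Nat):Int) by norm_num, PySem.List.slice_from_natCast]

-- the assembled strings agree for every nonempty sorted list m :: t
lemma assemble_eq (m : Nat × String) (t : List (Nat × String)) :
    (let swp := m :: t
     let structured := "=== MOST IMPORTANT ===\n"
     let structured := structured ++ (swp.headD (0, "")).2 ++ "\n\n"
     let structured := if 1 < swp.length then
         (PySem.List.slice swp (some 1) (some 3)).foldl
           (fun acc p => acc ++ p.2 ++ "\n\n") (structured ++ "=== IMPORTANT ===\n")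
       else structured
     let structured := if 3 < swp.length then
         (PySem.List.slice swp (some 3) none).foldl
           (fun acc p => acc ++ p.2 ++ "\n\n") (structured ++ "=== ADDITIONAL CONTEXT ===\n")
       else structured
     PySem.Str.strip structured)
    = PySem.Str.strip
        ((PySem.List.enumerate (m :: t)).foldl
          (fun acc rp => acc ++ PySem.Dict.getD (PySem.Dict.ofList
    [((0 : Int), "=== MOST IMPORTANT ===\n"), (1, "=== IMPORTANT ===\n"),
     (3, "=== ADDITIONAL CONTEXT ===\n")]) rp.1 "" ++ rp.2.2 ++ "\n\n") "") := by
  dsimp only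
  match t with
  | [] =>
    rw [if_neg (by norm_num), if_neg (by norm_num)]
    rw [show PySem.List.enumerate [m] (0:Int) = [((0:Int), m)] by
      rw [PySem.List.enumerate_cons]; rfl]
    simp only [List.foldl_cons, List.foldl_nil, getD_hdr0]
    refine congrArg _ ?_
    apply String.toList_inj.mp
    simp [String.toList_append]
  | [b] =>
    rw [if_neg (by norm_num), if_pos (by norm_num), slice13_eq]
    rw [show List.take 2 [b] = [b] from rfl]
    rw [show PySem.List.enumerate [m, b] (0:Int) = [((0:Int), m), ((1:Int), b)] by
      rw [PySem.List.enumerate_cons, PySem.List.enumerate_cons]; norm_num]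
    simp only [List.foldl_cons, List.foldl_nil, getD_hdr0, getD_hdr1]
    refine congrArg _ ?_
    apply String.toList_inj.mp
    simp [String.toList_append]
  | [b, c] =>
    rw [if_neg (by norm_num), if_pos (by norm_num), slice13_eq]
    rw [show List.take 2 [b, c] = [b, c] from rfl]
    rw [show PySem.List.enumerate [m, b, c] (0:Int)
        = [((0:Int), m), ((1:Int), b), ((2:Int), c)] by
      rw [PySem.List.enumerate_cons, PySem.List.enumerate_cons, PySem.List.enumerate_cons]
      norm_num]
    simp only [List.foldl_cons, List.foldl_nil, getD_hdr0, getD_hdr1, getD_hdr2]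
    refine congrArg _ ?_
    apply String.toList_inj.mp
    simp [String.toList_append]
  | b :: c :: d :: r =>
    simp only [List.length_cons]
    rw [if_pos (show 3 < r.length + 1 + 1 + 1 + 1 by omega),
      if_pos (show 1 < r.length + 1 + 1 + 1 + 1 by omega),
      slice13_eq, slice3_eq]
    rw [show List.take 2 (b :: c :: d :: r) = [b, c] from rfl,
      show List.drop 3 (m :: b :: c :: d :: r) = d :: r from rfl]
    rw [show PySem.List.enumerate (m :: b :: c :: d :: r) (0:Int)
        = ((0:Int), m) :: ((1:Int), b) :: ((2:Int), c) :: ((3:Int), d)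
            :: PySem.List.enumerate r 4 by
      rw [PySem.List.enumerate_cons, PySem.List.enumerate_cons, PySem.List.enumerate_cons,
        PySem.List.enumerate_cons]
      norm_num]
    simp only [List.foldl_cons, getD_hdr0, getD_hdr1, getD_hdr2, getD_hdr3]
    rw [foldB_high r 4 (by norm_num)]
    refine congrArg _ ?_
    congr 1
    apply String.toList_inj.mp
    simp [String.toList_append]

theorem structure_context_for_attention_py_spec : Claim_equal_structure_context_for_attention_py := by
  intro context _
  show structure_context_for_attention_py context = structure_context_for_attention_py_alt context
  simp only [structure_context_for_attention_py, structure_context_for_attention_py_alt]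
  rw [selExtract_eq_sorted2]
  have hne : PySem.List.sorted2
      ((List.map String.ofList (PySem.Chars.splitOn context.toList ("\n\n".toList))).map
        (fun s => ((PySem.Str.split₀ s).length, s)))
      (fun p => p.1) (fun p => p.2) true ≠ [] := by
    intro h
    have hp := PySem.List.sorted2_perm
      ((List.map String.ofList (PySem.Chars.splitOn context.toList ("\n\n".toList))).map
        (fun s => ((PySem.Str.split₀ s).length, s)))
      (fun p => p.1) (fun p => p.2) true
    rw [h] at hp
    have h2 := hp.symm.eq_nil
    simp_all [splitOn_ne_nil]
  obtain ⟨m, t, hmt⟩ := List.exists_cons_of_ne_nil hne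
  rw [hmt]
  exact assemble_eq m t
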